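-- pv_equiv track=rewrite | github.com/UH-Insure/DataPreprocess | src/preprocessing/slice_cryptol_preprocess.py | split_import_blocks
-- ===== SOURCE A (Python) =====
-- from typing import Optional, Tuple, List, Dict, Any
--
-- def split_import_blocks(code: str) -> Tuple[List[str], List[str], List[str]]:
--     """
--     Split a Cryptol module into (header, imports_block, body) using a
--     simple heuristic:
--
--       * header  : everything before the first 'import ' line
--       * imports : consecutive import / blank lines
--       * body    : everything after the import block
--     """
--     lines = code.splitlines()
--     header: List[str] = []
--     imports: List[str] = []
--     body: List[str] = []
--
--     in_imports = False
--     seen_import = False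
--
--     for line in lines:
--         stripped = line.lstrip()
--         if stripped.startswith("import "):
--             in_imports = True
--             seen_import = True
--             imports.append(line)
--         elif in_imports and (stripped == "" or stripped.startswith("--")):
--             # keep blank/comment lines inside the import block
--             imports.append(line)
--         elif in_imports and seen_import:
--             # first non-import, non-blank after imports → body
--             body.append(line)
--         else:
--             header.append(line)
--
--     # If we never saw an import, all lines are in header
--     if not seen_import:
--         return lines, [], []
--
--     return header, imports, body
-- ===== SOURCE B (Python) =====
-- def split_import_blocks(code):
--     lines = code.splitlines()
--
--     def is_import(line):
--         return line.lstrip().startswith("import ")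
--
--     def stays_in_imports(line):
--         s = line.lstrip()
--         return is_import(line) or s == "" or s.startswith("--")
--
--     i = next((k for k, line in enumerate(lines) if is_import(line)), None)
--     if i is None:
--         return lines, [], []
--     tail = lines[i:]
--     imports = [line for line in tail if stays_in_imports(line)]
--     body = [line for line in tail if not stays_in_imports(line)]
--     return lines[:i], imports, body
-- ===== Notes on version B (the rewrite author's own statement) =====
-- stated objective: simpler
-- what changed: Replaces A's single loop with two never-resetting boolean flags by an explicit decomposition: find the index of the first import line, take the prefix as header, and partition the tail into imports (import/blank/comment lines) and body with two filters.
import Mathlib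
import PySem

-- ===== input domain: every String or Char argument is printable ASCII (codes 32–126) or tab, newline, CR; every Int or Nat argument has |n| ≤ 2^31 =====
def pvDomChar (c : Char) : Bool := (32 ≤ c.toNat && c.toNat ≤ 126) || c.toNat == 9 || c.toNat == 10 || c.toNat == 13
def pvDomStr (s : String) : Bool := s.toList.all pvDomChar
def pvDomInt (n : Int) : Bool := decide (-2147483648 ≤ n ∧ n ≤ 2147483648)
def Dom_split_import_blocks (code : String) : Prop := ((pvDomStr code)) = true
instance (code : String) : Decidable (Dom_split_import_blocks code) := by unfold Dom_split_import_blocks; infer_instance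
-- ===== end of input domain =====

-- B replaces A's never-resetting flag state machine by a split-point-then-partition
-- decomposition (find first import line, take/drop, two filters); objective: simpler.

-- ===== PORT A =====
-- loop state: (header, imports, body, in_imports, seen_import)
def pvStepA (st : List String × List String × List String × Bool × Bool) (line : String) :
    List String × List String × List String × Bool × Bool :=
  match st with
  | (header, imports, body, in_imports, seen_import) =>
    let stripped := PySem.Str.lstrip line
    if PySem.Str.startswith stripped "import " then
      (header, imports ++ [line], body, true, true)
    else if in_imports && (stripped == "" || PySem.Str.startswith stripped "--") then
      (header, imports ++ [line], body, in_imports, seen_import)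
    else if in_imports && seen_import then
      (header, imports, body ++ [line], in_imports, seen_import)
    else
      (header ++ [line], imports, body, in_imports, seen_import)

def split_import_blocks (code : String) : List String × List String × List String :=
  let lines := PySem.Str.splitlines code
  let st := lines.foldl pvStepA ([], [], [], false, false)
  if !st.2.2.2.2 then (lines, [], [])
  else (st.1, st.2.1, st.2.2.1)

-- ===== PORT B =====
def pvIsImport (line : String) : Bool :=
  PySem.Str.startswith (PySem.Str.lstrip line) "import "

def pvStaysInImports (line : String) : Bool :=
  let s := PySem.Str.lstrip line
  pvIsImport line || s == "" || PySem.Str.startswith s "--"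

def split_import_blocks_alt (code : String) : List String × List String × List String :=
  let lines := PySem.Str.splitlines code
  match lines.findIdx? (fun line => pvIsImport line) with
  | none => (lines, [], [])
  | some i =>
    let tail := lines.drop i
    (lines.take i, tail.filter pvStaysInImports, tail.filter (fun l => !pvStaysInImports l))

-- ===== PRECONDITION & SPEC =====
def Spec_split_import_blocks (code : String) (out : List String × List String × List String) : Prop := out = split_import_blocks_alt code
instance (code : String) (out : List String × List String × List String) : Decidable (Spec_split_import_blocks code out) := by unfold Spec_split_import_blocks; infer_instance

-- ===== CLAIM (what is proved, stated in full; the proofs are below) =====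
def Claim_equal_split_import_blocks : Prop := ∀ (code : String), Dom_split_import_blocks code → Spec_split_import_blocks code (split_import_blocks code)

-- ===== LEMMAS AND PROOFS =====

-- Once A's flags are both true they stay true and the loop partitions the rest.
theorem pv_loop_true (ls : List String) (h im b : List String) :
    ls.foldl pvStepA (h, im, b, true, true)
      = (h, im ++ ls.filter pvStaysInImports,
         b ++ ls.filter (fun l => !pvStaysInImports l), true, true) := by
  induction ls generalizing im b with
  | nil => simp
  | cons l ls ih =>
    simp only [List.foldl_cons, pvStepA]
    split_ifs with h1 h2 h3
    · have hs : pvStaysInImports l = true := by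
        simp at h1; simp [pvStaysInImports, pvIsImport, h1]
      rw [ih]; simp [hs]
    · have hs : pvStaysInImports l = true := by
        simp at h2; rcases h2 with h2 | h2 <;> simp [pvStaysInImports, pvIsImport, h2]
      rw [ih]; simp [hs]
    · have hs : pvStaysInImports l = false := by
        simp at h1 h2; simp [pvStaysInImports, pvIsImport, h1, h2.1, h2.2]
      rw [ih]; simp [hs]
    · simp at h3

-- Before the first import line A's loop accumulates header lines; at the first
-- import line it hands over to pv_loop_true.
theorem pv_loop_false (ls : List String) (h : List String) :
    ls.foldl pvStepA (h, [], [], false, false)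
      = match ls.findIdx? (fun l => pvIsImport l) with
        | none => (h ++ ls, [], [], false, false)
        | some i => (h ++ ls.take i, (ls.drop i).filter pvStaysInImports,
                     (ls.drop i).filter (fun l => !pvStaysInImports l), true, true) := by
  induction ls generalizing h with
  | nil => simp
  | cons l ls ih =>
    by_cases h1 : pvIsImport l
    · have h1' : PySem.Str.startswith (PySem.Str.lstrip l) "import " = true := h1
      have hs : pvStaysInImports l = true := by simp [pvStaysInImports, h1]
      simp only [List.foldl_cons, pvStepA, h1', if_true]
      rw [pv_loop_true]
      simp [List.findIdx?_cons, h1, hs]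
    · have h1' : PySem.Str.startswith (PySem.Str.lstrip l) "import " = false := by
        simpa [pvIsImport] using h1
      simp only [List.foldl_cons, pvStepA, h1', Bool.false_and, if_false,
        Bool.false_eq_true]
      rw [ih]
      rw [List.findIdx?_cons]
      simp only [h1, if_false, Bool.false_eq_true]
      cases hfi : ls.findIdx? (fun l => pvIsImport l) <;>
        simp [List.take_succ_cons, List.drop_succ_cons]

-- ===== VERDICT (by name: the statement is the Claim_ definition above) =====
theorem split_import_blocks_spec : Claim_equal_split_import_blocks := by
  intro code _
  show split_import_blocks code = split_import_blocks_alt code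
  simp only [split_import_blocks, split_import_blocks_alt, pv_loop_false]
  cases (PySem.Str.splitlines code).findIdx? (fun line => pvIsImport line) <;> simp
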